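-- pv_equiv track=rewrite | github.com/CraftyCrashers/Informatica-5 | Programmeerwedstrijd/2018/Secundair/fracking.py | volgende_dag
-- ===== SOURCE A (Python) =====
-- def volgende_dag(beeld):
--     lijst_sterren, lijst_punten, rij, kolom = [], [], len(beeld), len(beeld[0])
--     for x in range(rij * kolom):
--         if beeld[x % rij][x // rij] == '*':
--             lijst_sterren += [[x % rij, x // rij]]
--     for x in lijst_sterren:
--         if [x[0], x[1] + 1] not in lijst_sterren or [x[0], x[1] - 1] not in lijst_sterren \
--             or [x[0] + 1, x[1]] not in lijst_sterren or [x[0] - 1, x[1]] not in lijst_sterren: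
--             lijst_punten += [x]
--     for x in lijst_punten:
--         beeld[x[0]][x[1]] = '.'
--     return beeld
-- ===== SOURCE B (Python) =====
-- def volgende_dag(beeld):
--     rij, kolom = len(beeld), len(beeld[0])
--     weg = []
--     for i in range(rij):
--         for j in range(kolom):
--             if beeld[i][j] == '*' and not (
--                     i + 1 < rij and beeld[i + 1][j] == '*'
--                     and i >= 1 and beeld[i - 1][j] == '*'
--                     and j + 1 < kolom and beeld[i][j + 1] == '*'
--                     and j >= 1 and beeld[i][j - 1] == '*'):
--                 weg.append((i, j))
--     for i, j in weg:
--         beeld[i][j] = '.'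
--     return beeld
-- ===== Notes on version B (the rewrite author's own statement) =====
-- stated objective: faster
-- what changed: Replaces A's star-coordinate list and its quadratic 'not in' membership scans by a direct nested row/column scan that reads the four neighbours straight from the grid with explicit bounds tests.
import Mathlib
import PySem

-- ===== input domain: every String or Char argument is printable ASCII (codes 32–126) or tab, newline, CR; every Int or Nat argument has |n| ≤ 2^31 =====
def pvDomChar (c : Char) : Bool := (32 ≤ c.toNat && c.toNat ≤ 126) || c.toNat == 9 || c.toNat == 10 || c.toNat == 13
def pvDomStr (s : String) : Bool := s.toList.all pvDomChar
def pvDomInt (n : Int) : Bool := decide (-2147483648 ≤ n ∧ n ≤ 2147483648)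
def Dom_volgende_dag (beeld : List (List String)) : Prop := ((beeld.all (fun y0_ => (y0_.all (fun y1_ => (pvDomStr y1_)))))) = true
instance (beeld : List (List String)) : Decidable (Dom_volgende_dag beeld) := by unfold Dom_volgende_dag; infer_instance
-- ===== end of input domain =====

-- B removes A's star-coordinate list and its quadratic membership scans: it scans the grid
-- directly with nested loops and explicit bounds tests (objective: faster; both Pythons mutate
-- `beeld` in place identically — the proof is about the returned grid).


-- ===== PORT A =====
-- cell read: under Pre_ every index used is in range, so getD equals Python's indexing
def pvCell (beeld : List (List String)) (i j : Nat) : String := (beeld.getD i []).getD j ""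

-- 'lijst_sterren' of A: one loop over range(rij*kolom), column index x // rij, row index x % rij
def starsA (beeld : List (List String)) : List (List Int) :=
  (List.range (beeld.length * (beeld.headD []).length)).foldl
    (fun acc x =>
      if pvCell beeld (x % beeld.length) (x / beeld.length) = "*"
      then acc ++ [[((x % beeld.length : Nat) : Int), ((x / beeld.length : Nat) : Int)]]
      else acc) []

-- 'lijst_punten' of A: membership tests of the four neighbours in lijst_sterren
def puntenA (beeld : List (List String)) : List (List Int) :=
  (starsA beeld).foldl
    (fun acc p =>
      if ¬ ((starsA beeld).contains [p.getD 0 0, p.getD 1 0 + 1]) ∨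
         ¬ ((starsA beeld).contains [p.getD 0 0, p.getD 1 0 - 1]) ∨
         ¬ ((starsA beeld).contains [p.getD 0 0 + 1, p.getD 1 0]) ∨
         ¬ ((starsA beeld).contains [p.getD 0 0 - 1, p.getD 1 0])
      then acc ++ [p] else acc) []

def volgende_dag (beeld : List (List String)) : List (List String) :=
  (puntenA beeld).foldl
    (fun b p => b.modify (p.getD 0 0).toNat (fun row => row.modify (p.getD 1 0).toNat (fun _ => "."))) beeld

-- ===== PORT B =====
-- 'weg' of B: nested row/column scan, neighbours read from the grid with explicit bounds tests
def wegB (beeld : List (List String)) : List (Nat × Nat) :=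
  (List.range beeld.length).foldl
    (fun acc i =>
      (List.range (beeld.headD []).length).foldl
        (fun acc2 j =>
          if pvCell beeld i j = "*" ∧
             ¬ (i + 1 < beeld.length ∧ pvCell beeld (i + 1) j = "*" ∧
                1 ≤ i ∧ pvCell beeld (i - 1) j = "*" ∧
                j + 1 < (beeld.headD []).length ∧ pvCell beeld i (j + 1) = "*" ∧
                1 ≤ j ∧ pvCell beeld i (j - 1) = "*")
          then acc2 ++ [(i, j)] else acc2) acc) []

def volgende_dag_alt (beeld : List (List String)) : List (List String) :=
  (wegB beeld).foldl
    (fun b q => b.modify q.1 (fun row => row.modify q.2 (fun _ => "."))) beeld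

-- ===== PRECONDITION & SPEC =====
-- Pre_ excludes exactly the inputs where the Python A raises IndexError: the empty grid
-- (len(beeld[0])) and grids with a row shorter than the first row (beeld[x % rij][x // rij]).
def Pre_volgende_dag (beeld : List (List String)) : Prop :=
  beeld ≠ [] ∧ ∀ row ∈ beeld, (beeld.headD []).length ≤ row.length
instance (beeld : List (List String)) : Decidable (Pre_volgende_dag beeld) := by
  unfold Pre_volgende_dag; infer_instance

def pvWitness_volgende_dag : List (List String) :=
  [[".", "*", "."], ["*", "*", "*"], [".", "*", "."]]

def Spec_volgende_dag (beeld : List (List String)) (out : List (List String)) : Prop := out = volgende_dag_alt beeld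
instance (beeld : List (List String)) (out : List (List String)) : Decidable (Spec_volgende_dag beeld out) := by unfold Spec_volgende_dag; infer_instance

-- ===== CLAIM (what is proved, stated in full; the proofs are below) =====
def Claim_equal_volgende_dag : Prop := ∀ (beeld : List (List String)), Dom_volgende_dag beeld → Pre_volgende_dag beeld → Spec_volgende_dag beeld (volgende_dag beeld)

-- ===== LEMMAS AND PROOFS =====

-- the grid with every cell of S blanked to "." (order-free description of both mutation loops)
def applySet (S : List (Nat × Nat)) (beeld : List (List String)) : List (List String) :=
  beeld.mapIdx (fun i row => row.mapIdx (fun j s => if (i, j) ∈ S then "." else s))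

theorem applySet_cons (q : Nat × Nat) (S : List (Nat × Nat)) (beeld : List (List String)) :
    applySet S (beeld.modify q.1 (fun row => row.modify q.2 (fun _ => "."))) =
      applySet (q :: S) beeld := by
  unfold applySet
  apply List.ext_getElem (by simp)
  intro i h1 h2
  simp only [List.getElem_mapIdx, List.getElem_modify]
  apply List.ext_getElem (by split <;> simp)
  intro j g1 g2
  by_cases hqi : q.1 = i
  · simp only [if_pos hqi, List.getElem_mapIdx, List.getElem_modify, List.mem_cons, Prod.ext_iff]
    by_cases hqj : q.2 = j
    · simp [hqi, hqj]
    · have hne : ¬(i = q.1 ∧ j = q.2) := fun h => hqj h.2.symm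
      simp [hne, hqj]
  · simp only [if_neg hqi, List.getElem_mapIdx, List.mem_cons, Prod.ext_iff]
    have : ¬(i = q.1 ∧ j = q.2) := fun h => hqi h.1.symm
    simp [this]

theorem applySet_nil (beeld : List (List String)) : applySet [] beeld = beeld := by
  apply List.ext_getElem (by simp [applySet])
  intro i h1 h2
  unfold applySet
  rw [List.getElem_mapIdx]
  apply List.ext_getElem (by simp)
  intro j g1 g2
  simp

theorem foldl_modify_eq_applySet (S : List (Nat × Nat)) (beeld : List (List String)) :
    S.foldl (fun b q => b.modify q.1 (fun row => row.modify q.2 (fun _ => "."))) beeld =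
      applySet S beeld := by
  induction S generalizing beeld with
  | nil => simp [applySet_nil]
  | cons q S ih =>
      rw [List.foldl_cons, ih, applySet_cons]

theorem applySet_congr (S T : List (Nat × Nat)) (beeld : List (List String))
    (h : ∀ q, q ∈ S ↔ q ∈ T) : applySet S beeld = applySet T beeld := by
  unfold applySet
  apply List.ext_getElem (by simp)
  intro i h1 h2
  rw [List.getElem_mapIdx, List.getElem_mapIdx]
  apply List.ext_getElem (by simp)
  intro j g1 g2
  rw [List.getElem_mapIdx, List.getElem_mapIdx]
  rw [if_congr (h (i, j)) rfl rfl]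

theorem mem_starsA (beeld : List (List String)) (hne : beeld ≠ []) (q : List Int) :
    q ∈ starsA beeld ↔ ∃ r c : Nat, r < beeld.length ∧ c < (beeld.headD []).length ∧
      pvCell beeld r c = "*" ∧ q = [(r : Int), (c : Int)] := by
  have hpos : 0 < beeld.length := List.length_pos_of_ne_nil hne
  unfold starsA
  rw [PySem.List.foldl_append_ite]
  simp only [List.nil_append, List.mem_map, List.mem_filter, List.mem_range, decide_eq_true_eq]
  constructor
  · rintro ⟨x, ⟨hx, hstar⟩, rfl⟩
    exact ⟨x % beeld.length, x / beeld.length, Nat.mod_lt _ hpos,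
      (Nat.div_lt_iff_lt_mul hpos).mpr (Nat.mul_comm beeld.length _ ▸ hx), hstar, rfl⟩
  · rintro ⟨r, c, hr, hc, hstar, rfl⟩
    have hmod : (c * beeld.length + r) % beeld.length = r := by
      rw [Nat.add_comm, Nat.add_mul_mod_self_right, Nat.mod_eq_of_lt hr]
    have hdiv : (c * beeld.length + r) / beeld.length = c := by
      rw [Nat.add_comm, Nat.add_mul_div_right _ _ hpos, Nat.div_eq_of_lt hr, Nat.zero_add]
    refine ⟨c * beeld.length + r, ⟨?_, by rw [hmod, hdiv]; exact hstar⟩, by rw [hmod, hdiv]⟩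
    have := Nat.mul_le_mul_right beeld.length (show c + 1 ≤ (beeld.headD []).length from hc)
    nlinarith

theorem mem_wegB (beeld : List (List String)) (i j : Nat) :
    (i, j) ∈ wegB beeld ↔ i < beeld.length ∧ j < (beeld.headD []).length ∧
      (pvCell beeld i j = "*" ∧
        ¬ (i + 1 < beeld.length ∧ pvCell beeld (i + 1) j = "*" ∧
           1 ≤ i ∧ pvCell beeld (i - 1) j = "*" ∧
           j + 1 < (beeld.headD []).length ∧ pvCell beeld i (j + 1) = "*" ∧
           1 ≤ j ∧ pvCell beeld i (j - 1) = "*")) := by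
  have key : wegB beeld = (List.range beeld.length).flatMap (fun i' =>
      ((List.range (beeld.headD []).length).filter
        (fun j' => decide (pvCell beeld i' j' = "*" ∧
          ¬ (i' + 1 < beeld.length ∧ pvCell beeld (i' + 1) j' = "*" ∧
             1 ≤ i' ∧ pvCell beeld (i' - 1) j' = "*" ∧
             j' + 1 < (beeld.headD []).length ∧ pvCell beeld i' (j' + 1) = "*" ∧
             1 ≤ j' ∧ pvCell beeld i' (j' - 1) = "*")))).map (fun j' => (i', j'))) := by
    unfold wegB
    rw [PySem.List.foldl_congr_mem (List.range beeld.length) _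
        (fun acc i' => acc ++ ((List.range (beeld.headD []).length).filter
          (fun j' => decide (pvCell beeld i' j' = "*" ∧
            ¬ (i' + 1 < beeld.length ∧ pvCell beeld (i' + 1) j' = "*" ∧
               1 ≤ i' ∧ pvCell beeld (i' - 1) j' = "*" ∧
               j' + 1 < (beeld.headD []).length ∧ pvCell beeld i' (j' + 1) = "*" ∧
               1 ≤ j' ∧ pvCell beeld i' (j' - 1) = "*")))).map (fun j' => (i', j'))) []
        (fun acc i' _ => PySem.List.foldl_append_ite _ _ _ _)]
    rw [PySem.List.foldl_append_eq_flatMap, List.nil_append]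
  rw [key]
  simp only [List.mem_flatMap, List.mem_map, List.mem_filter, List.mem_range,
    decide_eq_true_eq, Prod.mk.injEq]
  constructor
  · rintro ⟨i', hi', j', ⟨hj', hcond⟩, rfl, rfl⟩
    exact ⟨hi', hj', hcond⟩
  · rintro ⟨hi, hj, hcond⟩
    exact ⟨i, hi, j, ⟨hj, hcond⟩, rfl, rfl⟩

theorem contains_starsA (beeld : List (List String)) (hne : beeld ≠ []) (a b : Int) :
    ((starsA beeld).contains [a, b] = true) ↔
      (0 ≤ a ∧ a < beeld.length ∧ 0 ≤ b ∧ b < (beeld.headD []).length ∧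
       pvCell beeld a.toNat b.toNat = "*") := by
  rw [List.contains_iff_mem, mem_starsA beeld hne]
  constructor
  · rintro ⟨r, c, hr, hc, hstar, heq⟩
    obtain ⟨rfl, rfl⟩ : a = (r : Int) ∧ b = (c : Int) := by
      simpa using heq
    refine ⟨by omega, by omega, by omega, by omega, ?_⟩
    simpa using hstar
  · rintro ⟨ha0, ha, hb0, hb, hstar⟩
    exact ⟨a.toNat, b.toNat, by omega, by omega, hstar,
      by rw [Int.toNat_of_nonneg ha0, Int.toNat_of_nonneg hb0]⟩

theorem mem_map_puntenA (beeld : List (List String)) (hne : beeld ≠ []) (i j : Nat) :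
    (i, j) ∈ (puntenA beeld).map (fun p => ((p.getD 0 0).toNat, (p.getD 1 0).toNat)) ↔
      (i, j) ∈ wegB beeld := by
  have hpos : 0 < beeld.length := List.length_pos_of_ne_nil hne
  rw [mem_wegB]
  unfold puntenA
  rw [PySem.List.foldl_append_ite_eq_filter]
  simp only [List.nil_append, List.mem_map, List.mem_filter, decide_eq_true_eq]
  have hC1 : ∀ (_ : i < beeld.length) (_ : j < (beeld.headD []).length),
      (((starsA beeld).contains [(i : Int), (j : Int) + 1]) = true) ↔
        (j + 1 < (beeld.headD []).length ∧ pvCell beeld i (j + 1) = "*") := by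
    intro hi hj
    rw [contains_starsA beeld hne]
    constructor
    · rintro ⟨-, -, -, hb, hstar⟩
      exact ⟨by omega, by rwa [show ((i : Int)).toNat = i from by omega,
        show ((j : Int) + 1).toNat = j + 1 from by omega] at hstar⟩
    · rintro ⟨hb, hstar⟩
      exact ⟨by omega, by omega, by omega, by omega,
        by rwa [show ((i : Int)).toNat = i from by omega,
          show ((j : Int) + 1).toNat = j + 1 from by omega]⟩
  have hC2 : ∀ (_ : i < beeld.length) (_ : j < (beeld.headD []).length),
      (((starsA beeld).contains [(i : Int), (j : Int) - 1]) = true) ↔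
        (1 ≤ j ∧ pvCell beeld i (j - 1) = "*") := by
    intro hi hj
    rw [contains_starsA beeld hne]
    constructor
    · rintro ⟨-, -, hb0, -, hstar⟩
      exact ⟨by omega, by rwa [show ((i : Int)).toNat = i from by omega,
        show ((j : Int) - 1).toNat = j - 1 from by omega] at hstar⟩
    · rintro ⟨hb, hstar⟩
      exact ⟨by omega, by omega, by omega, by omega,
        by rwa [show ((i : Int)).toNat = i from by omega,
          show ((j : Int) - 1).toNat = j - 1 from by omega]⟩
  have hC3 : ∀ (_ : i < beeld.length) (_ : j < (beeld.headD []).length),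
      (((starsA beeld).contains [(i : Int) + 1, (j : Int)]) = true) ↔
        (i + 1 < beeld.length ∧ pvCell beeld (i + 1) j = "*") := by
    intro hi hj
    rw [contains_starsA beeld hne]
    constructor
    · rintro ⟨-, ha, -, -, hstar⟩
      exact ⟨by omega, by rwa [show ((i : Int) + 1).toNat = i + 1 from by omega,
        show ((j : Int)).toNat = j from by omega] at hstar⟩
    · rintro ⟨ha, hstar⟩
      exact ⟨by omega, by omega, by omega, by omega,
        by rwa [show ((i : Int) + 1).toNat = i + 1 from by omega,
          show ((j : Int)).toNat = j from by omega]⟩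
  have hC4 : ∀ (_ : i < beeld.length) (_ : j < (beeld.headD []).length),
      (((starsA beeld).contains [(i : Int) - 1, (j : Int)]) = true) ↔
        (1 ≤ i ∧ pvCell beeld (i - 1) j = "*") := by
    intro hi hj
    rw [contains_starsA beeld hne]
    constructor
    · rintro ⟨ha0, -, -, -, hstar⟩
      exact ⟨by omega, by rwa [show ((i : Int) - 1).toNat = i - 1 from by omega,
        show ((j : Int)).toNat = j from by omega] at hstar⟩
    · rintro ⟨ha, hstar⟩
      exact ⟨by omega, by omega, by omega, by omega,
        by rwa [show ((i : Int) - 1).toNat = i - 1 from by omega,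
          show ((j : Int)).toNat = j from by omega]⟩
  constructor
  · rintro ⟨p, ⟨hmem, hcond⟩, hf⟩
    rw [mem_starsA beeld hne] at hmem
    obtain ⟨r, c, hr, hc, hstar, rfl⟩ := hmem
    simp only [List.getD_cons_zero, List.getD_cons_succ, Int.toNat_natCast, Prod.mk.injEq] at hf hcond
    obtain ⟨rfl, rfl⟩ := hf
    refine ⟨hr, hc, by simpa using hstar, ?_⟩
    rintro ⟨h1, h2, h3, h4, h5, h6, h7, h8⟩
    rcases hcond with h | h | h | h
    · exact h ((hC1 hr hc).mpr ⟨h5, h6⟩)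
    · exact h ((hC2 hr hc).mpr ⟨h7, h8⟩)
    · exact h ((hC3 hr hc).mpr ⟨h1, h2⟩)
    · exact h ((hC4 hr hc).mpr ⟨h3, h4⟩)
  · rintro ⟨hi, hj, hstar, hnot⟩
    refine ⟨[(i : Int), (j : Int)], ⟨?_, ?_⟩, ?_⟩
    · rw [mem_starsA beeld hne]
      exact ⟨i, j, hi, hj, hstar, rfl⟩
    · simp only [List.getD_cons_zero, List.getD_cons_succ]
      by_contra hall
      push Not at hall
      obtain ⟨h1, h2, h3, h4⟩ := hall
      obtain ⟨b1, b2⟩ := (hC1 hi hj).mp (by simpa using h1)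
      obtain ⟨b3, b4⟩ := (hC2 hi hj).mp (by simpa using h2)
      obtain ⟨b5, b6⟩ := (hC3 hi hj).mp (by simpa using h3)
      obtain ⟨b7, b8⟩ := (hC4 hi hj).mp (by simpa using h4)
      exact hnot ⟨b5, b6, b7, b8, b1, b2, b3, b4⟩
    · simp

-- ===== VERDICT (by name: the statement is the Claim_ definition above) =====
theorem volgende_dag_spec : Claim_equal_volgende_dag := by
  intro beeld _ hpre
  obtain ⟨hne, _⟩ := hpre
  unfold Spec_volgende_dag volgende_dag volgende_dag_alt
  rw [show (puntenA beeld).foldl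
        (fun b p => b.modify (p.getD 0 0).toNat (fun row => row.modify (p.getD 1 0).toNat (fun _ => "."))) beeld
      = ((puntenA beeld).map (fun p => ((p.getD 0 0).toNat, (p.getD 1 0).toNat))).foldl
        (fun b q => b.modify q.1 (fun row => row.modify q.2 (fun _ => "."))) beeld
      from (List.foldl_map (f := fun p => ((p.getD 0 0).toNat, (p.getD 1 0).toNat))
        (g := fun b q => b.modify q.1 (fun row => row.modify q.2 (fun _ => ".")))
        (l := puntenA beeld) (init := beeld)).symm]
  rw [foldl_modify_eq_applySet, foldl_modify_eq_applySet]
  apply applySet_congr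
  intro q
  obtain ⟨i, j⟩ := q
  exact mem_map_puntenA beeld hne i j
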